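-- pv_equiv track=rewrite | github.com/COLAB2/moos-interface | world.py | calculate_grids
-- ===== SOURCE A (Python) =====
-- def calculate_grids(grid_size=20, distance=20):
--     """
--     :param grid_size: dimensions of the grid
--     :param distance: distance between each cell
--     :return: returns the way_points associated with the grid
--     """
--     # this is the center point of the first cell in the grid
--     start_point = [-131, 65]
--
--     # to store the way_points associtated with the cell position
--     grid = []
--
--     x = start_point[0] - distance
--     y = start_point[1] + distance
--     # loop for the vertical grid i.e c00, c10, c20 ect.
--     for i in range(0, grid_size):
--         y = y - distance
--         x = start_point[0] - distance
--         # loop for the horizontal grid i.e c00, c01, c02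
--         row = []
--         for j in range(0, grid_size):
--             x = x + distance
--             row.append([x, y])
--         grid.append(row)
--
--     return grid
-- ===== SOURCE B (Python) =====
-- def calculate_grids(grid_size=20, distance=20):
--     """Closed form: cell (i, j) is [-131 + j*distance, 65 - i*distance]."""
--     return [[[-131 + j * distance, 65 - i * distance]
--              for j in range(grid_size)]
--             for i in range(grid_size)]
-- ===== Notes on version B (the rewrite author's own statement) =====
-- stated objective: simpler
-- what changed: Replaced the threaded x/y accumulator loops with a closed-form nested comprehension computing each cell directly from its indices: cell (i, j) = [-131 + j*distance, 65 - i*distance].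
import Mathlib
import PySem

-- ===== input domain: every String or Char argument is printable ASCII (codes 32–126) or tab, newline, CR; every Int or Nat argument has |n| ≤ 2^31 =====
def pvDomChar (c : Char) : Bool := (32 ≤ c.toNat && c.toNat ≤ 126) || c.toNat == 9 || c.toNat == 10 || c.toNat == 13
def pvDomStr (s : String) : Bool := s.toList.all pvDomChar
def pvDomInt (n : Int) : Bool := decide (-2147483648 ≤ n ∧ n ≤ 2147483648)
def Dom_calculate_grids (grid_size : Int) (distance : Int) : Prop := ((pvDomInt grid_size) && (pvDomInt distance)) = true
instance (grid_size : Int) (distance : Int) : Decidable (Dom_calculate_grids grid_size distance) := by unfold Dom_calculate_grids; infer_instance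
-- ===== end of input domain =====

-- B replaces A's mutated running x/y accumulators by a closed-form per-cell formula (objective: simpler).

-- ===== PORT A =====
-- literal transliteration: the two nested accumulator loops, state threaded through foldl
def calculate_grids (grid_size : Int) (distance : Int) : List (List (List Int)) :=
  let start_point : List Int := [-131, 65]
  let x := PySem.List.pyGetD start_point 0 0 - distance
  let y := PySem.List.pyGetD start_point 1 0 + distance
  let st :=
    (PySem.List.pyRange 0 grid_size 1).foldl
      (fun (st : Int × Int × List (List (List Int))) (_ : Int) =>
        let y := st.2.1 - distance
        let x := PySem.List.pyGetD start_point 0 0 - distance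
        let inner :=
          (PySem.List.pyRange 0 grid_size 1).foldl
            (fun (s : Int × List (List Int)) (_ : Int) =>
              let x := s.1 + distance
              (x, s.2 ++ [[x, y]]))
            (x, [])
        (inner.1, y, st.2.2 ++ [inner.2]))
      (x, y, [])
  st.2.2

-- ===== PORT B =====
-- literal transliteration of Source B: nested comprehension, each cell from its indices
def calculate_grids_alt (grid_size : Int) (distance : Int) : List (List (List Int)) :=
  (PySem.List.pyRange 0 grid_size 1).map (fun i =>
    (PySem.List.pyRange 0 grid_size 1).map (fun j =>
      [-131 + j * distance, 65 - i * distance]))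

-- ===== PRECONDITION & SPEC =====
def Spec_calculate_grids (grid_size : Int) (distance : Int) (out : List (List (List Int))) : Prop := out = calculate_grids_alt grid_size distance
instance (grid_size : Int) (distance : Int) (out : List (List (List Int))) : Decidable (Spec_calculate_grids grid_size distance out) := by unfold Spec_calculate_grids; infer_instance

-- ===== CLAIM (what is proved, stated in full; the proofs are below) =====
def Claim_equal_calculate_grids : Prop := ∀ (grid_size : Int) (distance : Int), Dom_calculate_grids grid_size distance → Spec_calculate_grids grid_size distance (calculate_grids grid_size distance)

-- ===== LEMMAS AND PROOFS =====

-- the inner accumulator loop in closed form (elements of the iterated list are ignored)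
lemma pv_inner_fold (d y : Int) (l : List Int) (x : Int) (acc : List (List Int)) :
    (l.foldl (fun (s : Int × List (List Int)) (_ : Int) =>
        (s.1 + d, s.2 ++ [[s.1 + d, y]])) (x, acc))
    = (x + (l.length : Int) * d,
       acc ++ (List.range l.length).map (fun k : Nat => [x + ((k : Int) + 1) * d, y])) := by
  induction l generalizing x acc with
  | nil => simp
  | cons a l ih =>
    rw [List.foldl_cons, ih, List.length_cons, List.range_succ_eq_map]
    refine Prod.ext (by push_cast; ring) ?_
    show acc ++ [[x + d, y]] ++ _ = _
    simp only [List.map_cons, List.map_map, List.append_assoc, List.cons_append,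
      List.nil_append]
    congr 2
    · norm_num
    · exact List.map_congr_left (fun k _ => by
        simp only [Function.comp_apply]; push_cast; ring_nf)

-- the outer accumulator loop: the (y, grid) part of the state in closed form, for any x
lemma pv_outer_fold (n d x0 : Int) (l : List Int) (x y : Int) (g : List (List (List Int))) :
    (l.foldl (fun (st : Int × Int × List (List (List Int))) (_ : Int) =>
        ((List.foldl (fun (s : Int × List (List Int)) (_ : Int) =>
              (s.1 + d, s.2 ++ [[s.1 + d, st.2.1 - d]])) (x0, [])
            (PySem.List.pyRange 0 n 1)).1,
         st.2.1 - d,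
         st.2.2 ++ [(List.foldl (fun (s : Int × List (List Int)) (_ : Int) =>
              (s.1 + d, s.2 ++ [[s.1 + d, st.2.1 - d]])) (x0, [])
            (PySem.List.pyRange 0 n 1)).2])) (x, y, g)).2
    = (y - (l.length : Int) * d,
       g ++ (List.range l.length).map (fun i : Nat =>
         (List.range (PySem.List.pyRange 0 n 1).length).map
           (fun k : Nat => [x0 + ((k : Int) + 1) * d, y - ((i : Int) + 1) * d]))) := by
  induction l generalizing x y g with
  | nil => simp
  | cons a l ih =>
    rw [List.foldl_cons, ih, List.length_cons, List.range_succ_eq_map]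
    have hinner := pv_inner_fold d (y - d) (PySem.List.pyRange 0 n 1) x0 []
    refine Prod.ext (by push_cast; ring) ?_
    show g ++ [_] ++ _ = _
    rw [hinner]
    simp only [List.map_cons, List.map_map, List.append_assoc, List.cons_append,
      List.nil_append]
    congr 2
    · norm_num
    · exact List.map_congr_left (fun i _ => by
        simp only [Function.comp_apply]
        refine List.map_congr_left (fun k _ => ?_)
        push_cast; ring_nf)

-- ===== VERDICT (by name: the statement is the Claim_ definition above) =====
theorem calculate_grids_spec : Claim_equal_calculate_grids := by
  intro n d _
  show calculate_grids n d = calculate_grids_alt n d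
  have h0 : PySem.List.pyGetD [(-131 : Int), 65] 0 0 = -131 := by decide
  have h1 : PySem.List.pyGetD [(-131 : Int), 65] 1 0 = 65 := by decide
  unfold calculate_grids calculate_grids_alt
  simp only [h0, h1]
  rw [pv_outer_fold]
  rw [PySem.List.pyRange_one]
  simp only [List.map_map, List.length_map, List.length_range, Int.sub_zero, List.nil_append]
  refine List.map_congr_left (fun i _ => ?_)
  refine List.map_congr_left (fun k _ => ?_)
  simp only [Function.comp_apply]
  ring_nf
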